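-- pv_equiv track=rewrite | github.com/Jaladhankiharsh/CodeChef-DAA | 5_Greedy techniques/1_Basics of Greedy, and proofs/7_Chef_and_String/Solution.py | max_pairs
-- ===== SOURCE A (Python) =====
-- def max_pairs(s):
--     n = len(s)
--     pairs = 0
--     i = 0
--     while i < n - 1:
--         if (s[i] == 'x' and s[i + 1] == 'y') or (s[i] == 'y' and s[i + 1] == 'x'):
--             pairs += 1
--             i += 2  # Skip the next character as it's already paired
--         else:
--             i += 1
--     return pairs
-- ===== SOURCE B (Python) =====
-- def max_pairs(s):
--     # Run-length scan: accumulate maximal runs of consecutive xy/yx adjacencies,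
--     # each run of L characters contributes L // 2 pairs.
--     pairs = 0
--     run = 1
--     for j in range(1, len(s)):
--         a, b = s[j - 1], s[j]
--         if a != b and a in 'xy' and b in 'xy':
--             run += 1
--         else:
--             pairs += run // 2
--             run = 1
--     return pairs + run // 2
-- ===== Notes on version B (the rewrite author's own statement) =====
-- stated objective: alternative
-- what changed: B replaces A's greedy index walk (jumping the index by 2 over a matched pair, by 1 otherwise) with a single run-length scan over adjacent positions that accumulates maximal runs of xy/yx adjacencies and adds floor(run/2) per run.
import Mathlib
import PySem

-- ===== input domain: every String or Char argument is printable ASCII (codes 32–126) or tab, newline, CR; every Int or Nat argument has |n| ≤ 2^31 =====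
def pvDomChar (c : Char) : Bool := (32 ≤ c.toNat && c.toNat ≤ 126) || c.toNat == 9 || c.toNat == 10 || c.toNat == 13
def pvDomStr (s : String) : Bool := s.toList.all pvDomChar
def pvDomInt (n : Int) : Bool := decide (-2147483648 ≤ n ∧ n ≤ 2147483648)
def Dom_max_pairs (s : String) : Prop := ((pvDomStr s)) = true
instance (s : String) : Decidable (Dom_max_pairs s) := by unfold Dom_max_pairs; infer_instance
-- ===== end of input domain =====

-- B replaces A's greedy index walk with a run-length scan; same O(n) cost, different decomposition.

-- ===== PORT A =====
-- A's while loop: i jumps by 2 on a matched xy/yx pair, by 1 otherwise.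
def maxPairsLoopA (cs : List Char) (n i : Nat) (pairs : Int) : Int :=
  if i + 1 < n then
    if (cs.getD i ' ' == 'x' && cs.getD (i+1) ' ' == 'y')
        || (cs.getD i ' ' == 'y' && cs.getD (i+1) ' ' == 'x') then
      maxPairsLoopA cs n (i+2) (pairs + 1)
    else
      maxPairsLoopA cs n (i+1) pairs
  else pairs
termination_by n - i

def max_pairs (s : String) : Int :=
  let cs := s.toList
  let n := cs.length
  maxPairsLoopA cs n 0 0

-- ===== PORT B =====
-- B's adjacency test: a != b and a in 'xy' and b in 'xy'
def goodB (a b : Char) : Bool := a != b && (a == 'x' || a == 'y') && (b == 'x' || b == 'y')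

-- B's for-loop over j = 1 .. len(s)-1, carrying (prev char, pairs, run)
def maxPairsLoopB (prev : Char) (rest : List Char) (pairs run : Int) : Int :=
  match rest with
  | [] => pairs + PySem.Int.floordiv run 2
  | c :: t =>
    if goodB prev c then maxPairsLoopB c t pairs (run + 1)
    else maxPairsLoopB c t (pairs + PySem.Int.floordiv run 2) 1

def max_pairs_alt (s : String) : Int :=
  match s.toList with
  | [] => 0 + PySem.Int.floordiv 1 2
  | c :: t => maxPairsLoopB c t 0 1

-- ===== PRECONDITION & SPEC =====
def Spec_max_pairs (s : String) (out : Int) : Prop := out = max_pairs_alt s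
instance (s : String) (out : Int) : Decidable (Spec_max_pairs s out) := by unfold Spec_max_pairs; infer_instance

-- ===== CLAIM (what is proved, stated in full; the proofs are below) =====
def Claim_equal_max_pairs : Prop := ∀ (s : String), Dom_max_pairs s → Spec_max_pairs s (max_pairs s)

-- ===== LEMMAS AND PROOFS =====

-- A's adjacency test
def goodA (a b : Char) : Bool := (a == 'x' && b == 'y') || (a == 'y' && b == 'x')

-- the common reference: structural greedy over the list
def gRef : List Char → Int
  | a :: b :: t => if goodA a b then 1 + gRef t else gRef (b :: t)
  | _ => 0
termination_by l => l.length
decreasing_by all_goals simp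

theorem gRef_cons2 (a b : Char) (t : List Char) :
    gRef (a :: b :: t) = if goodA a b then 1 + gRef t else gRef (b :: t) := by
  rw [gRef]

theorem goodB_eq (a b : Char) : goodB a b = goodA a b := by
  simp only [goodB, goodA, bne]
  cases hax : a == 'x' <;> cases hay : a == 'y' <;>
    cases hbx : b == 'x' <;> cases hby : b == 'y' <;>
    simp_all [beq_iff_eq]

theorem loopA_eq (cs : List Char) (i : Nat) (pairs : Int) :
    maxPairsLoopA cs cs.length i pairs = pairs + gRef (cs.drop i) := by
  rw [maxPairsLoopA]
  split
  · rename_i h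
    have h1 : i < cs.length := by omega
    have h2 : i + 1 < cs.length := by omega
    have key : gRef (cs.drop i)
        = if goodA cs[i] cs[i+1] then 1 + gRef (cs.drop (i+2)) else gRef (cs.drop (i+1)) := by
      conv_lhs => rw [List.drop_eq_getElem_cons h1, List.drop_eq_getElem_cons h2]
      rw [gRef_cons2, show i + 1 + 1 = i + 2 from rfl, ← List.drop_eq_getElem_cons h2]
    rw [List.getD_eq_getElem cs ' ' h1, List.getD_eq_getElem cs ' ' h2]
    by_cases hg : goodA cs[i] cs[i+1]
    · rw [if_pos (by simpa [goodA] using hg), loopA_eq cs (i+2) (pairs+1), key, if_pos hg]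
      ring
    · rw [if_neg (by simpa [goodA] using hg), loopA_eq cs (i+1) pairs, key, if_neg hg]
  · rename_i h
    have hl : (cs.drop i).length ≤ 1 := by simp; omega
    match hd : cs.drop i with
    | [] => simp [gRef]
    | [a] => simp [gRef]
    | a :: b :: t => rw [hd] at hl; simp at hl
termination_by cs.length - i

theorem loopB_add (rest : List Char) : ∀ (prev : Char) (pairs run : Int),
    maxPairsLoopB prev rest pairs run = pairs + maxPairsLoopB prev rest 0 run := by
  induction rest with
  | nil => intro prev pairs run; simp [maxPairsLoopB]
  | cons c t ih =>
    intro prev pairs run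
    simp only [maxPairsLoopB]
    split
    · rw [ih c pairs (run + 1), ih c 0 (run + 1)]
    · rw [ih c (pairs + PySem.Int.floordiv run 2) 1,
          ih c (0 + PySem.Int.floordiv run 2) 1]
      ring

theorem loopB_g (rest : List Char) : ∀ (prev : Char) (r : Nat), 1 ≤ r →
    maxPairsLoopB prev rest 0 (r : Int)
      = ((r / 2 : Nat) : Int) + (if r % 2 = 0 then gRef rest else gRef (prev :: rest)) := by
  induction rest with
  | nil =>
    intro prev r _
    have h1 : gRef [prev] = 0 := by simp [gRef]
    have hfd : PySem.Int.floordiv (r : Int) 2 = ((r / 2 : Nat) : Int) := by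
      exact_mod_cast PySem.Int.floordiv_natCast r 2
    simp only [maxPairsLoopB, hfd]
    split <;> simp [gRef, h1]
  | cons c t ih =>
    intro prev r hr
    simp only [maxPairsLoopB]
    by_cases hg : goodB prev c
    · rw [if_pos hg]
      have hcast : (r : Int) + 1 = ((r + 1 : Nat) : Int) := by push_cast; ring
      rw [hcast, ih c (r + 1) (by omega)]
      rcases Nat.mod_two_eq_zero_or_one r with h0 | h0
    -- r even
      · have h1 : (r + 1) % 2 = 1 := by omega
        have h2 : (r + 1) / 2 = r / 2 := by omega
        rw [h1, h2, if_neg (show ¬((1:Nat) = 0) by omega), if_pos h0]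
      · have hga : goodA prev c = true := by rw [← goodB_eq]; exact hg
        have h1 : (r + 1) % 2 = 0 := by omega
        have h2 : (r + 1) / 2 = r / 2 + 1 := by omega
        rw [h1, h2, if_pos rfl, if_neg (show ¬(r % 2 = 0) by omega), gRef_cons2, if_pos hga]
        push_cast; ring
    · rw [if_neg hg]
      rw [loopB_add t c (0 + PySem.Int.floordiv (r : Int) 2) 1]
      have hone := ih c 1 (by omega)
      norm_num at hone
      rw [hone]
      have hga : goodA prev c = false := by rw [← goodB_eq]; simpa using hg
      have hpc : gRef (prev :: c :: t) = gRef (c :: t) := by rw [gRef_cons2, if_neg (by simp [hga])]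
      have hfd : PySem.Int.floordiv (r : Int) 2 = ((r / 2 : Nat) : Int) := by
        exact_mod_cast PySem.Int.floordiv_natCast r 2
      rw [hfd]
      rcases Nat.mod_two_eq_zero_or_one r with h0 | h0
      · rw [if_pos h0]
        ring
      · rw [if_neg (show ¬(r % 2 = 0) by omega), hpc]
        ring

theorem both_eq_gRef (s : String) : max_pairs s = max_pairs_alt s := by
  unfold max_pairs max_pairs_alt
  rcases h : s.toList with _ | ⟨c, t⟩
  · simp [maxPairsLoopA, PySem.Int.floordiv]
  · show maxPairsLoopA (c :: t) (c :: t).length 0 0 = maxPairsLoopB c t 0 1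
    rw [loopA_eq (c :: t) 0 0, List.drop_zero]
    have h1 := loopB_g t c 1 (by omega)
    norm_num at h1
    rw [h1]
    norm_num

-- ===== VERDICT (by name: the statement is the Claim_ definition above) =====
theorem max_pairs_spec : Claim_equal_max_pairs := by
  intro s _
  unfold Spec_max_pairs
  exact both_eq_gRef s
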